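-- pv_equiv track=rewrite | github.com/algoram/metodo-eliminazione-gauss | main.py | miglior_riga
-- ===== SOURCE A (Python) =====
-- def trova_pivot(riga):
-- 	pivot = 0
-- 	while pivot < len(riga) and riga[pivot] == 0:
-- 		pivot += 1
--
-- 	return pivot
--
-- def miglior_riga(mat):
-- 	posizione_pivot = len(mat[0])
-- 	lista_pivot = []
--
-- 	for i in range(len(mat)):
-- 		pivot = trova_pivot(mat[i])
--
-- 		if pivot < posizione_pivot:
-- 			posizione_pivot = pivot
-- 			lista_pivot = []
-- 			lista_pivot.append((pivot, i))
-- 		elif pivot == posizione_pivot: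
-- 			lista_pivot.append((pivot, i))
--
-- 	lista_pivot.sort()
--
-- 	return lista_pivot[0][1]
-- ===== SOURCE B (Python) =====
-- def miglior_riga(mat):
-- 	# Column-major scan: walk columns left to right; the first position (j, i)
-- 	# in column-then-row order where row i is either exhausted (all zeros) or
-- 	# has a nonzero entry at column j belongs to the row with the minimal
-- 	# pivot position, smallest index first.
-- 	for j in range(max(map(len, mat)) + 1):
-- 		for i, riga in enumerate(mat):
-- 			if j >= len(riga) or riga[j] != 0:
-- 				return i
-- ===== Notes on version B (the rewrite author's own statement) =====
-- stated objective: alternative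
-- what changed: Replaces A's row-major scheme (compute every row's pivot, collect ties in a list, sort, take the head) by a column-major scan: walk columns left to right and return the first row that is exhausted or has a nonzero entry at the current column, which is exactly the minimal-pivot row with the smallest index; the per-row pivot computation, the tie list and the sort all disappear.
import Mathlib
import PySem

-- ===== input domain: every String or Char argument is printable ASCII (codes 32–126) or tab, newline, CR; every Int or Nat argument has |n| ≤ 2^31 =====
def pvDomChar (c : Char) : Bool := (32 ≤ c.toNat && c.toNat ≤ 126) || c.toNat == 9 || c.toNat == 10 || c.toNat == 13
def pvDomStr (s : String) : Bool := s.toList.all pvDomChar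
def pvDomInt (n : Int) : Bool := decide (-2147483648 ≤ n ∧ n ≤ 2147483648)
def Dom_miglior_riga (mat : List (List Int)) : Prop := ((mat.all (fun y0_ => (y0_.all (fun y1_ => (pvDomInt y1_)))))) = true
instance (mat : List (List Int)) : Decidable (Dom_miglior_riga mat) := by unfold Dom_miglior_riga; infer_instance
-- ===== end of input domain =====

-- B replaces A's row-major pivot-list-then-sort by a column-major scan (first exhausted-or-nonzero cell in column order): an alternative algorithm, same result.

-- ===== PORT A =====
-- while pivot < len(riga) and riga[pivot] == 0: pivot += 1   (index walk ported as structural recursion with counter)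
def trova_pivot_go : List Int → Int → Int
  | [], pivot => pivot
  | x :: xs, pivot => if x = 0 then trova_pivot_go xs (pivot + 1) else pivot

def trova_pivot (riga : List Int) : Int := trova_pivot_go riga 0

-- the body of A's 'for i in range(len(mat))' loop; state = (posizione_pivot, lista_pivot)
def migliorStepA (mat : List (List Int)) (s : Int × List (Int × Int)) (i : Int) : Int × List (Int × Int) :=
  let pivot := trova_pivot (PySem.List.pyGetD mat i [])
  if pivot < s.1 then (pivot, [(pivot, i)])
  else if pivot = s.1 then (s.1, s.2 ++ [(pivot, i)])
  else s

def miglior_riga (mat : List (List Int)) : Int :=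
  -- mat[0] raises IndexError on empty mat (excluded by Pre_); pyGetD's default is never read inside Pre_
  let posizione0 : Int := ((PySem.List.pyGetD mat 0 []).length : Int)
  let res := List.foldl (migliorStepA mat) (posizione0, []) (PySem.List.pyRange 0 (mat.length : Int) 1)
  match PySem.List.sorted2 res.2 (·.1) (·.2) false with
  | (_, i) :: _ => i
  | [] => 0  -- lista_pivot[0] would raise IndexError; unreachable when mat ≠ []

-- ===== PORT B =====
-- the loop-body test 'j >= len(riga) or riga[j] != 0'
def colHitTest (j : Int) (riga : List Int) : Bool :=
  decide ((riga.length : Int) ≤ j) || (PySem.List.pyGetD riga j 0 != 0)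

-- inner 'for i, riga in enumerate(mat): if …: return i'  (i is the running enumerate counter)
def colHitGo (j : Int) : List (List Int) → Int → Option Int
  | [], _ => none
  | r :: rs, i => if colHitTest j r then some i else colHitGo j rs (i + 1)

-- max(map(len, mat)); raises ValueError on empty mat (excluded by Pre_), the 0 default is never read there
def pvColMax (mat : List (List Int)) : Int :=
  match PySem.List.max? (mat.map (fun r => ((r.length : Nat) : Int))) (fun x => x) with
  | some m => m
  | none => 0

def miglior_riga_alt (mat : List (List Int)) : Int :=
  match (PySem.List.pyRange 0 (pvColMax mat + 1) 1).findSome? (fun j => colHitGo j mat 0) with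
  | some i => i
  | none => 0  -- the Python falls off and returns None only on empty mat; unreachable under Pre_

-- ===== PRECONDITION & SPEC =====
-- A evaluates mat[0] and lista_pivot[0]: it raises IndexError exactly on the empty matrix, so Pre_ excludes only mat = [].
def Pre_miglior_riga (mat : List (List Int)) : Prop := mat ≠ []
instance (mat : List (List Int)) : Decidable (Pre_miglior_riga mat) := by unfold Pre_miglior_riga; infer_instance
def pvWitness_miglior_riga : List (List Int) := [[0, 3], [1, 2]]

def Spec_miglior_riga (mat : List (List Int)) (out : Int) : Prop := out = miglior_riga_alt mat
instance (mat : List (List Int)) (out : Int) : Decidable (Spec_miglior_riga mat out) := by unfold Spec_miglior_riga; infer_instance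

-- ===== CLAIM (what is proved, stated in full; the proofs are below) =====
def Claim_equal_miglior_riga : Prop := ∀ (mat : List (List Int)), Dom_miglior_riga mat → Pre_miglior_riga mat → Spec_miglior_riga mat (miglior_riga mat)

-- ===== LEMMAS AND PROOFS =====

-- abbreviation used only in the proofs: the pivot of row i of mat
def pvPiv (mat : List (List Int)) (i : Int) : Int := trova_pivot (PySem.List.pyGetD mat i [])

lemma pyGetD_cons_pos {α : Type} (x : α) (xs : List α) (j : Int) (d : α) (h : 1 ≤ j) :
    PySem.List.pyGetD (x :: xs) j d = PySem.List.pyGetD xs (j - 1) d := by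
  have hj1 : ((j - 1).toNat : Int) = j - 1 := by omega
  simp only [PySem.List.pyGetD]
  conv_lhs => rw [show j = ((j - 1).toNat : Int) + 1 by omega]
  rw [PySem.List.pyGet?_cons_succ, hj1]

lemma trova_pivot_go_ge : ∀ (riga : List Int) (p : Int), p ≤ trova_pivot_go riga p := by
  intro riga
  induction riga with
  | nil => intro p; simp [trova_pivot_go]
  | cons x xs ih =>
    intro p; simp only [trova_pivot_go]; split
    · have := ih (p + 1); omega
    · omega

lemma trova_pivot_go_le : ∀ (riga : List Int) (p : Int), trova_pivot_go riga p ≤ p + (riga.length : Int) := by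
  intro riga
  induction riga with
  | nil => intro p; simp [trova_pivot_go]
  | cons x xs ih =>
    intro p
    simp only [trova_pivot_go]
    split
    · have := ih (p + 1); simp only [List.length_cons]; push_cast; omega
    · simp only [List.length_cons]; push_cast; omega

-- every entry strictly before the pivot is zero (and in range)
lemma tp_before : ∀ (riga : List Int) (p j : Int), 0 ≤ j → p + j < trova_pivot_go riga p →
    PySem.List.pyGetD riga j 0 = 0 ∧ j < (riga.length : Int) := by
  intro riga
  induction riga with
  | nil => intro p j h0 h; simp [trova_pivot_go] at h; omega
  | cons x xs ih =>
    intro p j h0 h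
    simp only [trova_pivot_go] at h
    split at h
    · rename_i hx
      subst hx
      by_cases hj : j = 0
      · subst hj
        refine ⟨by simp [PySem.List.pyGetD_zero_cons], by simp only [List.length_cons]; push_cast; omega⟩
      · have h1 : 1 ≤ j := by omega
        have := ih (p + 1) (j - 1) (by omega) (by omega)
        rw [pyGetD_cons_pos _ _ _ _ h1]
        refine ⟨this.1, by simp only [List.length_cons]; push_cast; omega⟩
    · omega

-- the entry at the pivot itself, when in range, is nonzero
lemma tp_at : ∀ (riga : List Int) (p : Int), trova_pivot_go riga p < p + (riga.length : Int) →
    PySem.List.pyGetD riga (trova_pivot_go riga p - p) 0 ≠ 0 := by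
  intro riga
  induction riga with
  | nil => intro p h; simp only [trova_pivot_go, List.length_nil, Nat.cast_zero, add_zero] at h; omega
  | cons x xs ih =>
    intro p h
    simp only [trova_pivot_go] at *
    split
    · rename_i hx
      subst hx
      have hge := trova_pivot_go_ge xs (p + 1)
      have h1 : 1 ≤ trova_pivot_go xs (p + 1) - p := by omega
      rw [pyGetD_cons_pos _ _ _ _ h1]
      have := ih (p + 1) (by simp only [List.length_cons] at h; push_cast at h ⊢; omega)
      have heq : trova_pivot_go xs (p + 1) - p - 1 = trova_pivot_go xs (p + 1) - (p + 1) := by omega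
      rw [heq]; exact this
    · rename_i hx
      simpa [PySem.List.pyGetD_zero_cons] using hx

-- characterisation of B's per-cell test via the pivot of the row
lemma colHitTest_true_of_piv (riga : List Int) (h : trova_pivot riga < (riga.length : Int)) :
    colHitTest (trova_pivot riga) riga = true := by
  have := tp_at riga 0 (by simpa [trova_pivot] using h)
  simp only [trova_pivot] at this ⊢
  simp only [colHitTest, sub_zero] at *
  simp [this]

lemma colHitTest_false_of_lt (riga : List Int) (j : Int) (h0 : 0 ≤ j) (h : j < trova_pivot riga) :
    colHitTest j riga = false := by
  have := tp_before riga 0 j h0 (by simpa [trova_pivot] using h)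
  simp [colHitTest, this.1, not_le.mpr this.2]

-- A's running min-with-first-tie fold (the reference loop in loop_inv) computes the first argmin of pvPiv
lemma minby_fold (mat : List (List Int)) :
    ∀ (idxs : List Int) (b : Int), idxs.Pairwise (· < ·) → (∀ j ∈ idxs, b < j) →
    ∃ b', List.foldl (fun acc x =>
        match acc with
        | none => some x
        | some m => if trova_pivot (PySem.List.pyGetD mat x []) < trova_pivot (PySem.List.pyGetD mat m []) then some x else some m)
      (some b) idxs = some b' ∧
      (b' = b ∨ b' ∈ idxs) ∧ b ≤ b' ∧ pvPiv mat b' ≤ pvPiv mat b ∧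
      (b' = b ∨ pvPiv mat b' < pvPiv mat b) ∧
      (∀ i ∈ idxs, pvPiv mat b' ≤ pvPiv mat i) ∧
      (∀ i ∈ idxs, i < b' → pvPiv mat b' < pvPiv mat i) := by
  intro idxs
  induction idxs with
  | nil =>
    intro b _ _
    exact ⟨b, rfl, Or.inl rfl, le_refl _, le_refl _, Or.inl rfl, by simp, by simp⟩
  | cons i rest ih =>
    intro b hpw hlt
    have hbi : b < i := hlt i (by simp)
    have hpw' : rest.Pairwise (· < ·) := (List.pairwise_cons.mp hpw).2
    have hirest : ∀ j ∈ rest, i < j := (List.pairwise_cons.mp hpw).1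
    simp only [List.foldl_cons]
    by_cases h : trova_pivot (PySem.List.pyGetD mat i []) < trova_pivot (PySem.List.pyGetD mat b [])
    · rw [if_pos h]
      obtain ⟨b', h1, h2, h3, h4, h5, h6, h7⟩ := ih i hpw' hirest
      have hlt' : pvPiv mat b' < pvPiv mat b := lt_of_le_of_lt h4 h
      refine ⟨b', h1, ?_, by omega, le_of_lt hlt', Or.inr hlt', ?_, ?_⟩
      · rcases h2 with h2 | h2
        · exact Or.inr (by simp [h2])
        · exact Or.inr (by simp [h2])
      · intro i' hi'
        rcases List.mem_cons.mp hi' with hi' | hi'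
        · subst hi'; exact h4
        · exact h6 i' hi'
      · intro i' hi' hib
        rcases List.mem_cons.mp hi' with hi' | hi'
        · subst hi'
          rcases h5 with h5 | h5
          · omega
          · exact h5
        · exact h7 i' hi' hib
    · rw [if_neg h]
      rw [not_lt] at h
      obtain ⟨b', h1, h2, h3, h4, h5, h6, h7⟩ := ih b hpw' (fun j hj => lt_trans hbi (hirest j hj))
      refine ⟨b', h1, ?_, h3, h4, h5, ?_, ?_⟩
      · rcases h2 with h2 | h2
        · exact Or.inl h2
        · exact Or.inr (by simp [h2])
      · intro i' hi'
        rcases List.mem_cons.mp hi' with hi' | hi'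
        · subst hi'; exact le_trans h4 h
        · exact h6 i' hi'
      · intro i' hi' hib
        rcases List.mem_cons.mp hi' with hi' | hi'
        · subst hi'
          rcases h5 with h5 | h5
          · omega
          · exact lt_of_lt_of_le h5 h
        · exact h7 i' hi' hib

-- the inner row scan of B returns none when no row passes the test at this column
lemma colHitGo_none (j : Int) : ∀ (l : List (List Int)) (i : Int),
    (∀ r ∈ l, colHitTest j r = false) → colHitGo j l i = none := by
  intro l
  induction l with
  | nil => intro i _; rfl
  | cons r rs ih =>
    intro i h
    simp only [colHitGo, h r (by simp)]
    exact ih (i + 1) (fun r' hr' => h r' (by simp [hr']))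

-- … and returns the first passing row index otherwise
lemma colHitGo_some (j : Int) : ∀ (l : List (List Int)) (i k : Int), 0 ≤ k → k < (l.length : Int) →
    colHitTest j (PySem.List.pyGetD l k []) = true →
    (∀ m, 0 ≤ m → m < k → colHitTest j (PySem.List.pyGetD l m []) = false) →
    colHitGo j l i = some (i + k) := by
  intro l
  induction l with
  | nil => intro i k h0 hk _ _; simp at hk; omega
  | cons r rs ih =>
    intro i k h0 hk hhit hmiss
    by_cases hk0 : k = 0
    · subst hk0
      rw [PySem.List.pyGetD_zero_cons] at hhit
      simp [colHitGo, hhit]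
    · have h1 : 1 ≤ k := by omega
      have hr : colHitTest j r = false := by
        have := hmiss 0 (le_refl _) (by omega)
        simpa [PySem.List.pyGetD_zero_cons] using this
      simp only [colHitGo, hr, Bool.false_eq_true, if_false]
      have hrec := ih (i + 1) (k - 1) (by omega)
        (by simp only [List.length_cons] at hk; push_cast at hk; omega)
        (by rwa [pyGetD_cons_pos _ _ _ _ h1] at hhit)
        (by
          intro m hm0 hmk
          have := hmiss (m + 1) (by omega) (by omega)
          rwa [pyGetD_cons_pos _ _ _ _ (by omega), add_sub_cancel_right] at this)
      rw [hrec]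
      congr 1
      omega

-- the outer column loop: all columns before p miss, column p hits with value v
lemma findSome?_pyRange_first (f : Int → Option Int) (v : Int) :
    ∀ (n : Nat) (a b p : Int), p - a = (n : Int) → a ≤ p → p < b →
    (∀ j, a ≤ j → j < p → f j = none) → f p = some v →
    (PySem.List.pyRange a b 1).findSome? f = some v := by
  intro n
  induction n with
  | zero =>
    intro a b p hn ha hb hnone hp
    have hap : a = p := by omega
    subst hap
    rw [PySem.List.pyRange_one_cons (by omega)]
    simp [List.findSome?, hp]
  | succ m ih =>
    intro a b p hn ha hb hnone hp
    rw [PySem.List.pyRange_one_cons (by omega)]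
    have hfa : f a = none := hnone a (le_refl _) (by omega)
    simp only [List.findSome?, hfa]
    exact ih (a + 1) b p (by omega) (by omega) hb (fun j hj1 hj2 => hnone j (by omega) hj2) hp

-- folding insertBy over a list that is already in order (no element 'before' its predecessors) is the identity
lemma foldl_insertBy_sorted {α : Type} (before : α → α → Bool) :
    ∀ (l acc : List α), (acc ++ l).Pairwise (fun a b => before b a = false) →
    List.foldl (fun acc x => PySem.List.insertBy before x acc) acc l = acc ++ l := by
  intro l
  induction l with
  | nil => intro acc _; simp
  | cons x xs ih =>
    intro acc h
    have hacc : ∀ y ∈ acc, before x y = false := by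
      intro y hy
      have := (List.pairwise_append.mp h).2.2 y hy x (by simp)
      exact this
    simp only [List.foldl_cons]
    rw [PySem.List.insertBy_of_forall_not_before before x acc hacc]
    have h' : ((acc ++ [x]) ++ xs).Pairwise (fun a b => before b a = false) := by
      simpa using h
    rw [ih (acc ++ [x]) h']
    simp

-- the joint loop invariant: A's (posizione_pivot, lista_pivot) state vs the running argmin fold
lemma loop_inv (mat : List (List Int)) :
    ∀ (idxs : List Int) (p b : Int) (L : List (Int × Int)),
    trova_pivot (PySem.List.pyGetD mat b []) = p →
    (∀ q ∈ L, q.1 = p ∧ b < q.2) →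
    L.Pairwise (fun a c => a.2 < c.2) →
    (∀ j ∈ idxs, b < j ∧ ∀ q ∈ L, q.2 < j) →
    idxs.Pairwise (· < ·) →
    ∃ p' b' L',
      List.foldl (migliorStepA mat) (p, (p, b) :: L) idxs = (p', (p', b') :: L') ∧
      trova_pivot (PySem.List.pyGetD mat b' []) = p' ∧
      (∀ q ∈ L', q.1 = p' ∧ b' < q.2) ∧
      L'.Pairwise (fun a c => a.2 < c.2) ∧
      List.foldl (fun acc x =>
          match acc with
          | none => some x
          | some m => if trova_pivot (PySem.List.pyGetD mat x []) < trova_pivot (PySem.List.pyGetD mat m []) then some x else some m)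
        (some b) idxs = some b' := by
  intro idxs
  induction idxs with
  | nil =>
    intro p b L hb hL hpair _ _
    exact ⟨p, b, L, rfl, hb, hL, hpair, rfl⟩
  | cons i idxs ih =>
    intro p b L hb hL hpair hlt hpw
    have hbi : b < i := (hlt i (by simp)).1
    have hpw' : idxs.Pairwise (· < ·) := (List.pairwise_cons.mp hpw).2
    have hi_lt : ∀ j ∈ idxs, i < j := (List.pairwise_cons.mp hpw).1
    simp only [List.foldl_cons]
    set k := trova_pivot (PySem.List.pyGetD mat i []) with hk
    rcases lt_trichotomy k p with hkp | hkp | hkp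
    · -- new strict minimum: reset the list / take the new argmin
      have hstep : migliorStepA mat (p, (p, b) :: L) i = (k, [(k, i)]) := by
        simp [migliorStepA, ← hk, hkp]
      rw [hstep]
      have hBstep : (if k < trova_pivot (PySem.List.pyGetD mat b []) then some i else some b) = some i := by
        rw [hb, if_pos hkp]
      obtain ⟨p', b', L', h1, h2, h3, h4, h5⟩ :=
        ih k i [] hk.symm (by simp) (by simp)
          (fun j hj => ⟨hi_lt j hj, by simp⟩) hpw'
      refine ⟨p', b', L', h1, h2, h3, h4, ?_⟩
      simpa [hBstep] using h5
    · -- tie: append, keep the old head / the fold keeps the first argmin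
      have hstep : migliorStepA mat (p, (p, b) :: L) i = (p, (p, b) :: (L ++ [(p, i)])) := by
        simp [migliorStepA, ← hk, hkp]
      rw [hstep]
      have hBstep : (if k < trova_pivot (PySem.List.pyGetD mat b []) then some i else some b) = some b := by
        rw [hb, hkp, if_neg (lt_irrefl p)]
      have hL' : ∀ q ∈ L ++ [(p, i)], q.1 = p ∧ b < q.2 := by
        intro q hq
        rcases List.mem_append.mp hq with hq | hq
        · exact hL q hq
        · simp only [List.mem_singleton] at hq; subst hq; exact ⟨rfl, hbi⟩
      have hpair' : (L ++ [(p, i)]).Pairwise (fun a c => a.2 < c.2) := by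
        rw [List.pairwise_append]
        refine ⟨hpair, by simp, ?_⟩
        intro a ha c hc
        simp only [List.mem_singleton] at hc; subst hc
        exact (hlt i (by simp)).2 a ha
      have hlt' : ∀ j ∈ idxs, b < j ∧ ∀ q ∈ L ++ [(p, i)], q.2 < j := by
        intro j hj
        refine ⟨(hlt j (by simp [hj])).1, ?_⟩
        intro q hq
        rcases List.mem_append.mp hq with hq | hq
        · exact (hlt j (by simp [hj])).2 q hq
        · simp only [List.mem_singleton] at hq; subst hq; exact hi_lt j hj
      obtain ⟨p', b', L', h1, h2, h3, h4, h5⟩ := ih p b (L ++ [(p, i)]) hb hL' hpair' hlt' hpw'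
      refine ⟨p', b', L', h1, h2, h3, h4, ?_⟩
      simpa [hBstep] using h5
    · -- larger pivot: both states unchanged
      have hstep : migliorStepA mat (p, (p, b) :: L) i = (p, (p, b) :: L) := by
        simp only [migliorStepA, ← hk]
        rw [if_neg (by omega), if_neg (by omega)]
      rw [hstep]
      have hBstep : (if k < trova_pivot (PySem.List.pyGetD mat b []) then some i else some b) = some b := by
        rw [hb, if_neg (by omega)]
      have hlt' : ∀ j ∈ idxs, b < j ∧ ∀ q ∈ L, q.2 < j := fun j hj => hlt j (by simp [hj])
      obtain ⟨p', b', L', h1, h2, h3, h4, h5⟩ := ih p b L hb hL hpair hlt' hpw'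
      refine ⟨p', b', L', h1, h2, h3, h4, ?_⟩
      simpa [hBstep] using h5

-- ===== VERDICT (by name: the statement is the Claim_ definition above) =====
theorem miglior_riga_spec : Claim_equal_miglior_riga := by
  unfold Claim_equal_miglior_riga
  intro mat _ hpre
  unfold Spec_miglior_riga
  obtain ⟨r, rs, rfl⟩ : ∃ r rs, mat = r :: rs := by
    cases mat with
    | nil => exact absurd rfl hpre
    | cons r rs => exact ⟨r, rs, rfl⟩
  have hpos : (0 : Int) < (((r :: rs).length : Nat) : Int) := by
    simp only [List.length_cons]; push_cast; omega
  have hrange : PySem.List.pyRange 0 (((r :: rs).length : Nat) : Int) 1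
      = 0 :: PySem.List.pyRange 1 (((r :: rs).length : Nat) : Int) 1 :=
    PySem.List.pyRange_one_cons hpos
  have h0 : PySem.List.pyGetD (r :: rs) 0 [] = r := by simp [pysem]
  set k0 := trova_pivot r with hk0
  have hle : k0 ≤ (r.length : Int) := by
    have := trova_pivot_go_le r 0
    simpa [trova_pivot, hk0] using this
  have hfirst : migliorStepA (r :: rs) (((r.length : Nat) : Int), []) 0 = (k0, [(k0, 0)]) := by
    simp only [migliorStepA, h0, ← hk0]
    by_cases hk : k0 < (r.length : Int)
    · rw [if_pos hk]
    · have heq : k0 = (r.length : Int) := le_antisymm hle (by omega)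
      rw [if_neg hk, if_pos heq, ← heq]
      simp
  obtain ⟨p', b', L', h1, h2, h3, h4, h5⟩ :=
    loop_inv (r :: rs) (PySem.List.pyRange 1 (((r :: rs).length : Nat) : Int) 1) k0 0 []
      (by rw [h0]) (by simp) (by simp)
      (by
        intro j hj
        have := (PySem.List.mem_pyRange_one.mp hj).1
        exact ⟨by omega, by simp⟩)
      (PySem.List.pairwise_lt_pyRange_one 1 _)
  have hfst : ∀ q ∈ (p', b') :: L', q.1 = p' := by
    intro q hq
    rcases List.mem_cons.mp hq with hq | hq
    · rw [hq]
    · exact (h3 q hq).1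
  have hsnd : ((p', b') :: L').Pairwise (fun a c => a.2 < c.2) :=
    List.pairwise_cons.mpr ⟨fun q hq => (h3 q hq).2, h4⟩
  -- A's final sort is the identity: lista_pivot is already lexicographically increasing
  have hsorted : PySem.List.sorted2 ((p', b') :: L') (·.1) (·.2) false = (p', b') :: L' := by
    have hpwb : ((p', b') :: L').Pairwise
        (fun a b => (decide (b.1 < a.1) || (!decide (a.1 < b.1) && decide (b.2 < a.2))) = false) := by
      refine hsnd.imp_of_mem ?_
      intro a b ha hb hab
      have ha1 := hfst a ha
      have hb1 := hfst b hb
      simp only [ha1, hb1, lt_irrefl, decide_false, Bool.false_or, Bool.not_false, Bool.true_and,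
        decide_eq_false_iff_not, not_lt]
      omega
    have := foldl_insertBy_sorted
      (fun a b : Int × Int => decide (a.1 < b.1) || (!decide (b.1 < a.1) && decide (a.2 < b.2)))
      ((p', b') :: L') [] (by simpa using hpwb)
    simpa [PySem.List.sorted2] using this
  -- evaluate port A
  have hA : miglior_riga (r :: rs) = b' := by
    simp only [miglior_riga, hrange, List.foldl_cons, h0]
    rw [hfirst, h1, hsorted]
  -- characterise b' as the first argmin of the row pivots
  obtain ⟨b'', hf1, hf2, hf3, hf4, hf5, hf6, hf7⟩ :=
    minby_fold (r :: rs) (PySem.List.pyRange 1 (((r :: rs).length : Nat) : Int) 1) 0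
      (PySem.List.pairwise_lt_pyRange_one 1 _)
      (fun j hj => by have := (PySem.List.mem_pyRange_one.mp hj).1; omega)
  have hbb : b'' = b' := by
    have := hf1.symm.trans h5
    exact Option.some.inj this
  subst hbb
  set n : Int := (((r :: rs).length : Nat) : Int) with hn
  have hb'mem : 0 ≤ b'' ∧ b'' < n := by
    rcases hf2 with h | h
    · subst h; exact ⟨le_refl _, hpos⟩
    · have := PySem.List.mem_pyRange_one.mp h; exact ⟨by omega, this.2⟩
  have hpv0 : pvPiv (r :: rs) 0 = k0 := by
    simp only [pvPiv, h0, hk0]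
  have hminall : ∀ i, 0 ≤ i → i < n → pvPiv (r :: rs) b'' ≤ pvPiv (r :: rs) i := by
    intro i h0i hin
    by_cases hi0 : i = 0
    · subst hi0; exact hf4
    · exact hf6 i (PySem.List.mem_pyRange_one.mpr ⟨by omega, hin⟩)
  have hstrict : ∀ i, 0 ≤ i → i < b'' → pvPiv (r :: rs) b'' < pvPiv (r :: rs) i := by
    intro i h0i hib
    by_cases hi0 : i = 0
    · subst hi0
      rcases hf5 with h | h
      · omega
      · exact h
    · exact hf7 i (PySem.List.mem_pyRange_one.mpr ⟨by omega, by omega⟩) hib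
  -- bounds for the minimal pivot p := pvPiv b''
  set p : Int := pvPiv (r :: rs) b'' with hp
  have hp0 : 0 ≤ p := by
    have := trova_pivot_go_ge (PySem.List.pyGetD (r :: rs) b'' []) 0
    simpa [hp, pvPiv, trova_pivot] using this
  have hpmx : p ≤ pvColMax (r :: rs) := by
    have hple : p ≤ k0 := by
      have := hminall 0 (le_refl _) hpos
      rwa [hpv0] at this
    have hmem : ((r.length : Nat) : Int) ∈ (r :: rs).map (fun r => ((r.length : Nat) : Int)) := by simp
    have hne : (r :: rs).map (fun r => ((r.length : Nat) : Int)) ≠ [] := by simp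
    obtain ⟨m, hm⟩ : ∃ m, PySem.List.max? ((r :: rs).map (fun r => ((r.length : Nat) : Int))) (fun x => x) = some m := by
      cases hmx : PySem.List.max? ((r :: rs).map (fun r => ((r.length : Nat) : Int))) (fun x => x) with
      | none => exact absurd ((PySem.List.max?_eq_none_iff _ _).mp hmx) hne
      | some m => exact ⟨m, rfl⟩
    have hlem := PySem.List.max?_isMax hm _ hmem
    simp only [pvColMax, hm]
    calc p ≤ k0 := hple
      _ ≤ (r.length : Int) := hle
      _ ≤ m := hlem
  -- evaluate port B
  have hB : miglior_riga_alt (r :: rs) = b'' := by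
    have hhit : colHitGo p (r :: rs) 0 = some (0 + b'') := by
      apply colHitGo_some p (r :: rs) 0 b'' hb'mem.1 (by simpa [hn] using hb'mem.2)
      · -- row b'' passes the test at column p
        by_cases hcase : p < ((PySem.List.pyGetD (r :: rs) b'' []).length : Int)
        · have := colHitTest_true_of_piv (PySem.List.pyGetD (r :: rs) b'' []) (by simpa [hp, pvPiv] using hcase)
          simpa [hp, pvPiv] using this
        · simp only [colHitTest]
          simp [not_lt.mp hcase]
      · -- every earlier row fails at column p (its pivot is strictly larger)
        intro m hm0 hmb
        exact colHitTest_false_of_lt _ p hp0 (hstrict m hm0 hmb)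
    have hnone : ∀ j, 0 ≤ j → j < p → colHitGo j (r :: rs) 0 = none := by
      intro j h0j hjp
      apply colHitGo_none
      intro row hrow
      obtain ⟨k, hk, hkeq⟩ := List.mem_iff_getElem.mp hrow
      have hkpv : PySem.List.pyGetD (r :: rs) ((k : Nat) : Int) [] = row := by
        simp [PySem.List.pyGetD_natCast, List.getD_eq_getElem?_getD, List.getElem?_eq_getElem hk, hkeq]
      have hjlt : j < trova_pivot row := by
        have := hminall ((k : Nat) : Int) (by positivity) (by simp only [hn]; exact_mod_cast hk)
        rw [hp] at this
        calc j < p := hjp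
          _ ≤ pvPiv (r :: rs) ((k : Nat) : Int) := this
          _ = trova_pivot row := by rw [pvPiv, hkpv]
      exact colHitTest_false_of_lt row j h0j hjlt
    have := findSome?_pyRange_first (fun j => colHitGo j (r :: rs) 0) (0 + b'') p.toNat 0 (pvColMax (r :: rs) + 1) p
      (by omega) hp0 (by omega) (fun j hj1 hj2 => hnone j hj1 hj2) hhit
    simp only [miglior_riga_alt, this]
    omega
  rw [hA, hB]
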